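-- pv_equiv track=rewrite | github.com/kriskwiatkowski/mlkem-prime-roots | mlkem_prime_roots.py | generate_bit_reversed_roots
-- ===== SOURCE A (Python) =====
-- import math
-- from typing import List, Tuple
--
-- def bit_reverse(num: int, bits: int) -> int:
--     """Reverse the bits of a number."""
--     result = 0
--     for _ in range(bits):
--         result = (result << 1) | (num & 1)
--         num >>= 1
--     return result
--
-- def generate_bit_reversed_roots(roots: List[int]) -> List[int]:
--     """Generate bit-reversed order of roots for NTT."""
--     n = len(roots)
--     bits = int(math.log2(n))
--
--     bit_reversed = [0] * n
--     for i in range(n):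
--         j = bit_reverse(i, bits)
--         bit_reversed[j] = roots[i]
--
--     return bit_reversed
-- ===== SOURCE B (Python) =====
-- def generate_bit_reversed_roots(roots):
--     """Generate bit-reversed order of roots for NTT.
--
--     Incremental bit-reversal: rev[i] is derived in O(1) from rev[i >> 1],
--     so the whole permutation costs O(n) instead of O(n log n)."""
--     n = len(roots)
--     bits = n.bit_length() - 1
--     half = bits - 1
--     rev = [0] * n
--     for i in range(1, n):
--         rev[i] = (rev[i >> 1] >> 1) | ((i & 1) << half)
--     out = [0] * n
--     for i in range(n):
--         out[rev[i]] = roots[i]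
--     return out
-- ===== Notes on version B (the rewrite author's own statement) =====
-- stated objective: faster
-- what changed: Instead of recomputing each bit-reversed index with a per-index O(log n) bit loop, B builds the whole reversed-index table incrementally in O(1) per entry via rev[i] = (rev[i>>1]>>1) | ((i&1)<<(bits-1)), then scatters once.
import Mathlib
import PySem

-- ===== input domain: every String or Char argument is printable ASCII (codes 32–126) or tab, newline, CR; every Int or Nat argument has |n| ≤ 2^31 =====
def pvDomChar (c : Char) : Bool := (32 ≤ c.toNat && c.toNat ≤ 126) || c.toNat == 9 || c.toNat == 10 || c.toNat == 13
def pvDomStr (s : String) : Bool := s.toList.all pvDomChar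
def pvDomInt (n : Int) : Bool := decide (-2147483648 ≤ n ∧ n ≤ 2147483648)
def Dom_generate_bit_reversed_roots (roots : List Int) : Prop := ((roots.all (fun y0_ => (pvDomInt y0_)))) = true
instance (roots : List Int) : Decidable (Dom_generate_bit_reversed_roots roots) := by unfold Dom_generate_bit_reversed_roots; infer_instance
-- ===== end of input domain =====

-- B replaces the per-index O(log n) bit_reverse loop with an O(n) incremental
-- table (rev[i] derived from rev[i >> 1]); same return value on every nonempty list.


-- ===== PORT A =====
-- bit_reverse(num, bits): num is always a range(n) index here, so num ≥ 0 and the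
-- bitwise steps are ported exactly as Nat arithmetic:
-- (result << 1) | (num & 1) = 2*result + num % 2 (the low bit of result << 1 is 0),
-- and num >>= 1 is num / 2.
def bitReverseA (num bits : Nat) : Nat :=
  ((List.range bits).foldl
    (fun (st : Nat × Nat) _ => (2 * st.1 + st.2 % 2, st.2 / 2)) (0, num)).1

-- bits = int(math.log2(n)) is floor(log2 n) = Nat.log2 n on the admitted sizes;
-- math.log2(0) raises ValueError (n = 0 is excluded by Pre_).
def generate_bit_reversed_roots (roots : List Int) : List Int :=
  let n := roots.length
  let bits := Nat.log2 n
  (List.range n).foldl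
    (fun acc i => acc.set (bitReverseA i bits) (roots.getD i 0))
    (List.replicate n 0)

-- ===== PORT B =====
-- bits = n.bit_length() - 1: equals Nat.log2 n for n ≥ 1; for n = 0 both loops
-- below are empty either way, so the port is exact there too.  The bitwise step
-- for i ≥ 1 is ported exactly as Nat arithmetic: rev[i >> 1] >> 1 = rev[i/2] / 2,
-- and `|` of that (which is < 2^half) with (i & 1) << half = (i % 2) * 2^half is `+`.
def generate_bit_reversed_roots_alt (roots : List Int) : List Int :=
  let n := roots.length
  let bits := Nat.log2 n
  let half := bits - 1
  let rev := (List.range' 1 (n - 1)).foldl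
    (fun rev i => rev.set i ((rev.getD (i / 2) 0) / 2 + (i % 2) * 2 ^ half))
    (List.replicate n 0)
  (List.range n).foldl
    (fun out i => out.set (rev.getD i 0) (roots.getD i 0))
    (List.replicate n 0)

-- ===== PRECONDITION & SPEC =====
-- Pre_ excludes only the empty list, on which A raises ValueError (math.log2(0)).
def Pre_generate_bit_reversed_roots (roots : List Int) : Prop := roots ≠ []
instance (roots : List Int) : Decidable (Pre_generate_bit_reversed_roots roots) := by
  unfold Pre_generate_bit_reversed_roots; infer_instance

def pvWitness_generate_bit_reversed_roots : List Int := [5, -3, 7, 2]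

def Spec_generate_bit_reversed_roots (roots : List Int) (out : List Int) : Prop := out = generate_bit_reversed_roots_alt roots
instance (roots : List Int) (out : List Int) : Decidable (Spec_generate_bit_reversed_roots roots out) := by unfold Spec_generate_bit_reversed_roots; infer_instance

-- ===== CLAIM (what is proved, stated in full; the proofs are below) =====
def Claim_equal_generate_bit_reversed_roots : Prop := ∀ (roots : List Int), Dom_generate_bit_reversed_roots roots → Pre_generate_bit_reversed_roots roots → Spec_generate_bit_reversed_roots roots (generate_bit_reversed_roots roots)

-- ===== LEMMAS AND PROOFS =====

-- Mathematical bit reversal of the low b bits of m (high-end recurrence).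
def brev : Nat → Nat → Nat
  | 0, _ => 0
  | b + 1, m => 2 * brev b m + (m / 2 ^ b) % 2

theorem brev_zero (b : Nat) : brev b 0 = 0 := by
  induction b with
  | zero => rfl
  | succ b ih => simp [brev, ih]

-- low-end recurrence
theorem brev_succ_low (b m : Nat) : brev (b + 1) m = (m % 2) * 2 ^ b + brev b (m / 2) := by
  induction b generalizing m with
  | zero => simp [brev]
  | succ b ih =>
    have h2 : m / 2 ^ (b + 1) = (m / 2) / 2 ^ b := by
      rw [pow_succ, Nat.mul_comm, ← Nat.div_div_eq_div_mul]
    calc brev (b + 2) m = 2 * brev (b + 1) m + (m / 2 ^ (b + 1)) % 2 := rfl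
      _ = 2 * ((m % 2) * 2 ^ b + brev b (m / 2)) + ((m / 2) / 2 ^ b) % 2 := by rw [ih, h2]
      _ = (m % 2) * 2 ^ (b + 1) + (2 * brev b (m / 2) + ((m / 2) / 2 ^ b) % 2) := by ring
      _ = (m % 2) * 2 ^ (b + 1) + brev (b + 1) (m / 2) := rfl

theorem brev_succ_div_two (b m : Nat) : brev (b + 1) m / 2 = brev b m := by
  have : (m / 2 ^ b) % 2 < 2 := Nat.mod_lt _ (by norm_num)
  simp only [brev]; omega

-- A's inner loop computes brev.
theorem bitReverseA_loop (b : Nat) : ∀ (r m : Nat),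
    (List.range b).foldl
      (fun (st : Nat × Nat) _ => (2 * st.1 + st.2 % 2, st.2 / 2)) (r, m)
    = (r * 2 ^ b + brev b m, m / 2 ^ b) := by
  induction b with
  | zero => intro r m; simp [brev]
  | succ b ih =>
    intro r m
    rw [List.range_succ, List.foldl_append, ih r m]
    simp only [List.foldl_cons, List.foldl_nil, brev, Prod.mk.injEq]
    refine ⟨by ring, ?_⟩
    rw [pow_succ, ← Nat.div_div_eq_div_mul]

theorem bitReverseA_eq_brev (m b : Nat) : bitReverseA m b = brev b m := by
  unfold bitReverseA
  rw [bitReverseA_loop]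
  simp

-- setting at the loop index preserves length
theorem foldl_set_length (g : List Nat → Nat → Nat) :
    ∀ (l : List Nat) (acc : List Nat),
      (l.foldl (fun a i => a.set i (g a i)) acc).length = acc.length := by
  intro l
  induction l with
  | nil => intro acc; rfl
  | cons x xs ih => intro acc; rw [List.foldl_cons, ih]; simp

theorem foldl_set_congr {α : Type} (f g : Nat → Nat) (v : Nat → α) :
    ∀ (l : List Nat) (acc : List α), (∀ i ∈ l, f i = g i) →
      l.foldl (fun a i => a.set (f i) (v i)) acc
        = l.foldl (fun a i => a.set (g i) (v i)) acc := by
  intro l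
  induction l with
  | nil => intro _ _; rfl
  | cons x xs ih =>
    intro acc h
    simp only [List.foldl_cons]
    rw [h x (by simp), ih _ (fun i hi => h i (by simp [hi]))]

-- B's rev table: after processing indices 1..k, entry j equals brev bits j for j ≤ k, else 0.
theorem rev_table_spec (n bits : Nat) (hb : 2 ≤ n → 1 ≤ bits) :
    ∀ (k : Nat), k + 1 ≤ n → ∀ (j : Nat), j < n →
      ((List.range' 1 k).foldl
        (fun rev i => rev.set i ((rev.getD (i / 2) 0) / 2 + (i % 2) * 2 ^ (bits - 1)))
        (List.replicate n (0 : Nat))).getD j 0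
      = if j ≤ k then brev bits j else 0 := by
  intro k
  induction k with
  | zero =>
    intro _ j hj
    simp only [List.range'_zero, List.foldl_nil]
    rw [List.getD_eq_getElem?_getD, List.getElem?_replicate, if_pos hj]
    by_cases h0 : j = 0
    · simp [h0, brev_zero]
    · rw [if_neg (by omega)]; rfl
  | succ k ih =>
    intro hk j hj
    rw [List.range'_1_concat, List.foldl_append, List.foldl_cons, List.foldl_nil]
    set rv := (List.range' 1 k).foldl
        (fun rev i => rev.set i ((rev.getD (i / 2) 0) / 2 + (i % 2) * 2 ^ (bits - 1)))
        (List.replicate n (0 : Nat)) with hrv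
    have hlen : rv.length = n := by
      rw [hrv, foldl_set_length (fun a i => (a.getD (i / 2) 0) / 2 + (i % 2) * 2 ^ (bits - 1))]
      simp
    have hbits : 1 ≤ bits := hb (by omega)
    rw [List.getD_eq_getElem?_getD, List.getElem?_set, hlen]
    by_cases hjk : 1 + k = j
    · subst hjk
      rw [if_pos rfl, if_pos (by omega), Option.getD_some, if_pos (by omega)]
      have hd2 : (1 + k) / 2 ≤ k := by omega
      have hd2n : (1 + k) / 2 < n := by omega
      have hv : rv.getD ((1 + k) / 2) 0 = brev bits ((1 + k) / 2) := by
        rw [ih (by omega) _ hd2n, if_pos hd2]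
      obtain ⟨b', rfl⟩ : ∃ b', bits = b' + 1 := ⟨bits - 1, by omega⟩
      rw [hv, brev_succ_div_two, brev_succ_low]
      simp only [Nat.add_sub_cancel]
      omega
    · rw [if_neg hjk, ← List.getD_eq_getElem?_getD, ih (by omega) _ hj]
      by_cases h1 : j ≤ k
      · rw [if_pos h1, if_pos (by omega)]
      · rw [if_neg h1, if_neg (by omega)]

-- ===== VERDICT (by name: the statement is the Claim_ definition above) =====
theorem generate_bit_reversed_roots_spec : Claim_equal_generate_bit_reversed_roots := by
  intro roots _ hpre
  unfold Spec_generate_bit_reversed_roots generate_bit_reversed_roots generate_bit_reversed_roots_alt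
  dsimp only
  have hn : 1 ≤ roots.length := List.length_pos_iff.mpr hpre
  apply foldl_set_congr
  intro i hi
  have hin : i < roots.length := List.mem_range.mp hi
  have hb : 2 ≤ roots.length → 1 ≤ Nat.log2 roots.length := by
    intro h2
    exact (Nat.le_log2 (by omega)).mpr (by simpa using h2)
  rw [rev_table_spec roots.length (Nat.log2 roots.length) hb (roots.length - 1)
        (by omega) i hin, if_pos (by omega), bitReverseA_eq_brev]
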